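-- pv_equiv track=rewrite | github.com/HuangxinDong/AdventOfCode | 2025/03/solution03.py | find_joltage_12
-- ===== SOURCE A (Python) =====
-- def find_joltage_12(s, num_of_digits = 12):
--     s = s.strip()
--     length = len(s)
--     stack = []
--     pop_num = length - num_of_digits
--     if num_of_digits > length:
--         return int(s)
--     for char in s:
--         while stack and pop_num > 0 and stack[-1] < char:
--             stack.pop()
--             pop_num -= 1
--         stack.append(char)
--     if pop_num > 0:
--         stack = stack[:-pop_num]
--     final_joltage = int(''.join(stack))
--     return final_joltage
-- ===== SOURCE B (Python) =====
-- def find_joltage_12(s, num_of_digits = 12):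
--     s = s.strip()
--     length = len(s)
--     if num_of_digits > length:
--         return int(s)
--     chosen = []
--     lo = 0
--     for remaining in range(num_of_digits, 0, -1):
--         window = s[lo:length - remaining + 1]
--         c = max(window)
--         lo += window.index(c) + 1
--         chosen.append(c)
--     return int(''.join(chosen))
-- ===== Notes on version B (the rewrite author's own statement) =====
-- stated objective: alternative
-- what changed: Replaces the monotonic stack with pop budget by a direct greedy selection: for each of the k output positions, pick the leftmost maximum in the feasible window s[lo:length-remaining+1] and advance lo past it.
-- outside the precondition, e.g. on find_joltage_12('+92', 2): A returns 92, B returns 92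
import Mathlib
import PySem

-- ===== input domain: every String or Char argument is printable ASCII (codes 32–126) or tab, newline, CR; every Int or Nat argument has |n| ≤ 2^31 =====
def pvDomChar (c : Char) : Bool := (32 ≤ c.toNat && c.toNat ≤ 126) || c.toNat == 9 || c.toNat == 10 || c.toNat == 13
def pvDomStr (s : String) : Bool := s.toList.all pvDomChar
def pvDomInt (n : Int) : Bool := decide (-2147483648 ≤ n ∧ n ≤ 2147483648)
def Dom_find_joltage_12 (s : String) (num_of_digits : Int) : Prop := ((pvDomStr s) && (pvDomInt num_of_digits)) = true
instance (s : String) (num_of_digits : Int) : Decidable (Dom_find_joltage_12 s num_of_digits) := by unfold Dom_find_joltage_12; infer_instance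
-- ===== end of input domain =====

-- B replaces A's monotonic stack by a greedy per-position leftmost-maximum window scan (alternative decomposition, same results).

-- ===== PORT A =====
-- inner 'while stack and pop_num > 0 and stack[-1] < char': the Python stack is kept
-- reversed here (top of stack = head of list), so ''.join(stack) is the REVERSE of r.1
def pvPop (c : Char) : List Char → Int → List Char × Int
  | [], p => ([], p)
  | x :: rest, p => if 0 < p ∧ x < c then pvPop c rest (p - 1) else (x :: rest, p)

-- 'for char in s: …; stack.append(char)'
def pvLoop : List Char → List Char → Int → List Char × Int
  | [], st, p => (st, p)
  | ch :: rest, st, p =>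
    let r := pvPop ch st p
    pvLoop rest (ch :: r.1) r.2

def find_joltage_12 (s : String) (num_of_digits : Int) : Int :=
  let t := PySem.Chars.strip s.toList
  let length : Int := PySem.List.len t
  if num_of_digits > length then (PySem.Int.ofChars? t).getD 0
  else
    let r := pvLoop t [] (length - num_of_digits)
    -- 'if pop_num > 0: stack = stack[:-pop_num]' ; int(''.join(stack))
    let stack := if 0 < r.2 then PySem.List.slice r.1.reverse none (some (-r.2)) else r.1.reverse
    (PySem.Int.ofChars? stack).getD 0

-- ===== PORT B =====
-- 'for remaining in range(num_of_digits, 0, -1): window = s[lo:length-remaining+1]; c = max(window); lo += window.index(c) + 1; chosen.append(c)'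
def altLoop (t : List Char) (length : Int) : Nat → Int → List Char → List Char
  | 0, _, acc => acc
  | m + 1, lo, acc =>
    let window := PySem.List.slice t (some lo) (some (length - ((m : Int) + 1) + 1))
    match PySem.List.max? window (fun c => c) with
    | none => acc          -- max([]) raises ValueError in Python; unreachable under Pre_
    | some c =>
      match PySem.List.index? window c with
      | none => acc        -- unreachable: c ∈ window
      | some j => altLoop t length m (lo + (j : Int) + 1) (acc ++ [c])

def find_joltage_12_alt (s : String) (num_of_digits : Int) : Int :=
  let t := PySem.Chars.strip s.toList
  let length : Int := PySem.List.len t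
  if num_of_digits > length then (PySem.Int.ofChars? t).getD 0
  else (PySem.Int.ofChars? (altLoop t length num_of_digits.toNat 0 [])).getD 0

-- ===== PRECONDITION & SPEC =====
-- Pre_ excludes inputs where A raises ValueError at int(): num_of_digits ≤ 0 (int('') on the
-- emptied stack), and non-int-parsable strings in the num_of_digits > length branch; it also
-- excludes (conservatively) stripped strings with non-digit characters in the selection branch,
-- where int() on the selected subsequence may raise (on some such inputs A does return, e.g. '+92').
def Pre_find_joltage_12 (s : String) (num_of_digits : Int) : Prop :=
  if num_of_digits > PySem.List.len (PySem.Chars.strip s.toList)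
  then (PySem.Int.ofChars? (PySem.Chars.strip s.toList)).isSome = true
  else 1 ≤ num_of_digits ∧ (PySem.Chars.strip s.toList).all (fun c => '0' ≤ c && c ≤ '9') = true
instance (s : String) (num_of_digits : Int) : Decidable (Pre_find_joltage_12 s num_of_digits) := by unfold Pre_find_joltage_12; infer_instance
def pvWitness_find_joltage_12 : String × Int := ("3142", 2)

def Spec_find_joltage_12 (s : String) (num_of_digits : Int) (out : Int) : Prop := out = find_joltage_12_alt s num_of_digits
instance (s : String) (num_of_digits : Int) (out : Int) : Decidable (Spec_find_joltage_12 s num_of_digits out) := by unfold Spec_find_joltage_12; infer_instance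

-- ===== CLAIM (what is proved, stated in full; the proofs are below) =====
def Claim_equal_find_joltage_12 : Prop := ∀ (s : String) (num_of_digits : Int), Dom_find_joltage_12 s num_of_digits → Pre_find_joltage_12 s num_of_digits → Spec_find_joltage_12 s num_of_digits (find_joltage_12 s num_of_digits)

-- ===== LEMMAS AND PROOFS =====

-- the common greedy description both loops are reduced to
def greedy : Nat → List Char → List Char
  | 0, _ => []
  | m + 1, t =>
    match PySem.List.max? (t.take (t.length - m)) (fun c => c) with
    | none => []
    | some c =>
      match PySem.List.index? (t.take (t.length - m)) c with
      | none => []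
      | some j => c :: greedy m (t.drop (j + 1))

theorem pvPop_spec (c : Char) (st : List Char) (p : Int) :
    ∃ d : Nat, pvPop c st p = (st.drop d, p - d) ∧ d ≤ st.length ∧ (d = 0 ∨ (d : Int) ≤ p) := by
  induction st generalizing p with
  | nil => exact ⟨0, by simp [pvPop]⟩
  | cons x rest ih =>
    by_cases hc : 0 < p ∧ x < c
    · obtain ⟨d, hd, hdl, hdp⟩ := ih (p - 1)
      refine ⟨d + 1, ?_, by simpa using Nat.succ_le_succ hdl, ?_⟩
      · simp only [pvPop, if_pos hc, hd, List.drop_succ_cons, Prod.mk.injEq]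
        exact ⟨trivial, by push_cast; ring⟩
      · right; rcases hdp with h0 | hle <;> omega
    · exact ⟨0, by simp [pvPop, if_neg hc], by simp, Or.inl rfl⟩

theorem pvPop_all_lt (c : Char) (st : List Char) (p : Int)
    (h : ∀ x ∈ st, x < c) (hp : (st.length : Int) ≤ p) :
    pvPop c st p = ([], p - st.length) := by
  induction st generalizing p with
  | nil => simp [pvPop]
  | cons x rest ih =>
    have hx : x < c := h x (by simp)
    have hp' : (rest.length : Int) ≤ p - 1 := by simp at hp; omega
    have hpos : 0 < p := by simp at hp; omega
    rw [pvPop, if_pos ⟨hpos, hx⟩, ih (p - 1) (fun y hy => h y (by simp [hy])) hp']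
    simp only [Prod.mk.injEq, List.length_cons]
    exact ⟨trivial, by push_cast; ring⟩

theorem pvPop_append_stop (c : Char) (st r : List Char) (p p' : Int) (y : Char) (rest : List Char)
    (h : pvPop c st p = (y :: rest, p')) :
    pvPop c (st ++ r) p = (y :: rest ++ r, p') := by
  induction st generalizing p with
  | nil => simp [pvPop] at h
  | cons x st' ih =>
    by_cases hc : 0 < p ∧ x < c
    · rw [pvPop, if_pos hc] at h
      rw [List.cons_append, pvPop, if_pos hc]
      exact ih (p - 1) h
    · rw [pvPop, if_neg hc] at h
      obtain ⟨h1, h2⟩ := Prod.mk.injEq .. ▸ h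
      cases h1
      rw [List.cons_append, pvPop, if_neg hc]
      simp [h2]

theorem pvPop_append_empty (c : Char) (st r : List Char) (p p' : Int)
    (h : pvPop c st p = ([], p')) :
    pvPop c (st ++ r) p = pvPop c r p' := by
  induction st generalizing p with
  | nil =>
    obtain ⟨h1, h2⟩ := Prod.mk.injEq .. ▸ (by simpa [pvPop] using h : (([] : List Char), p) = (([] : List Char), p'))
    simp [h2]
  | cons x st' ih =>
    by_cases hc : 0 < p ∧ x < c
    · rw [pvPop, if_pos hc] at h
      rw [List.cons_append, pvPop, if_pos hc]
      exact ih (p - 1) h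
    · rw [pvPop, if_neg hc] at h
      simp at h

theorem pvLoop_append (u v st : List Char) (p : Int) :
    pvLoop (u ++ v) st p = pvLoop v (pvLoop u st p).1 (pvLoop u st p).2 := by
  induction u generalizing st p with
  | nil => simp [pvLoop]
  | cons ch rest ih => simp only [List.cons_append, pvLoop]; exact ih _ _

theorem pvLoop_len (t st : List Char) (p : Int) :
    ((pvLoop t st p).1.length : Int) + (p - (pvLoop t st p).2) = st.length + t.length := by
  induction t generalizing st p with
  | nil => simp [pvLoop]
  | cons ch rest ih =>
    obtain ⟨d, hd, hdl, -⟩ := pvPop_spec ch st p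
    have := ih (ch :: st.drop d) (p - d)
    simp only [pvLoop, hd] at *
    simp only [List.length_cons, List.length_drop] at *
    push_cast [hdl] at this ⊢
    omega

theorem pvLoop_budget_nonneg (t st : List Char) (p : Int) (hp : 0 ≤ p) :
    0 ≤ (pvLoop t st p).2 := by
  induction t generalizing st p with
  | nil => simpa [pvLoop] using hp
  | cons ch rest ih =>
    obtain ⟨d, hd, -, hdp⟩ := pvPop_spec ch st p
    simp only [pvLoop, hd]
    exact ih _ _ (by rcases hdp with h0 | hle <;> omega)

theorem pvLoop_phase1 (c : Char) (u st : List Char) (p : Int)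
    (hst : ∀ x ∈ st, x < c) (hu : ∀ x ∈ u, x < c)
    (hp : (st.length : Int) + u.length ≤ p) :
    pvLoop (u ++ [c]) st p = ([c], p - st.length - u.length) := by
  induction u generalizing st p with
  | nil =>
    have hall := pvPop_all_lt c st p hst (by simpa using hp)
    simp [pvLoop, hall]
  | cons a u' ih =>
    obtain ⟨d, hd, hdl, -⟩ := pvPop_spec a st p
    rw [List.cons_append, pvLoop]
    simp only [hd]
    have ha : a < c := hu a (by simp)
    have hres := ih (a :: st.drop d) (p - d)
      (by intro x hx; rcases List.mem_cons.mp hx with rfl | hx'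
          · exact ha
          · exact hst x (List.mem_of_mem_drop hx'))
      (fun x hx => hu x (by simp [hx]))
      (by simp only [List.length_cons, List.length_drop]; push_cast [hdl] at hp ⊢; simp at hp; omega)
    rw [hres]
    simp only [List.length_cons, List.length_drop, Prod.mk.injEq]
    push_cast [hdl]
    exact ⟨trivial, by ring⟩

theorem pvLoop_phase2 (c : Char) (v st : List Char) (p : Int) (hp : 0 ≤ p)
    (hv : ∀ (i : Nat), (h : i < v.length) → c < v[i] → p ≤ (st.length : Int) + i) :
    pvLoop v (st ++ [c]) p = ((pvLoop v st p).1 ++ [c], (pvLoop v st p).2) := by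
  induction v generalizing st p with
  | nil => simp [pvLoop]
  | cons a v' ih =>
    obtain ⟨d, hd, hdl, hdp⟩ := pvPop_spec a st p
    have hq : 0 ≤ p - d := by rcases hdp with h0 | hle <;> omega
    have hstep : pvPop a (st ++ [c]) p = (st.drop d ++ [c], p - d) := by
      cases hdrop : st.drop d with
      | cons y rest => rw [← hdrop]; exact hdrop ▸ pvPop_append_stop a st [c] p (p - d) y rest (hdrop ▸ hd)
      | nil =>
        rw [pvPop_append_empty a st [c] p (p - d) (hdrop ▸ hd)]
        have hcon : ¬ (0 < p - d ∧ c < a) := by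
          rintro ⟨hpos, hca⟩
          have := hv 0 (by simp) (by simpa using hca)
          have hlen : st.length ≤ d := List.drop_eq_nil_iff.mp hdrop
          omega
        simp only [pvPop, List.nil_append]
        rw [if_neg hcon]
    rw [pvLoop, pvLoop]
    simp only [hstep, hd]
    have := ih (a :: st.drop d) (p - d) hq
      (by intro i hi hci
          have := hv (i + 1) (by simpa using Nat.succ_lt_succ hi) (by simpa using hci)
          simp only [List.length_cons, List.length_drop]
          push_cast [hdl]
          push_cast at this
          omega)
    simpa using this

-- the final value of A's loop + truncation, in joined (true) order
def afin (t : List Char) (B : Int) : List Char :=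
  (if 0 < (pvLoop t [] B).2
   then (pvLoop t [] B).1.drop (pvLoop t [] B).2.toNat
   else (pvLoop t [] B).1).reverse

theorem a_eq_greedy (m : Nat) (t : List Char) (hm : m ≤ t.length) :
    afin t ((t.length : Int) - m) = greedy m t := by
  induction m generalizing t with
  | zero =>
    rw [afin, greedy]
    simp only [Nat.cast_zero, sub_zero]
    have hlen := pvLoop_len t [] (t.length : Int)
    have hnn := pvLoop_budget_nonneg t [] (t.length : Int) (Int.natCast_nonneg _)
    simp only [List.length_nil] at hlen
    by_cases h2 : 0 < (pvLoop t [] (t.length : Int)).2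
    · rw [if_pos h2, List.drop_eq_nil_iff.mpr (by omega), List.reverse_nil]
    · have hnil : (pvLoop t [] (t.length : Int)).1 = [] :=
        List.eq_nil_of_length_eq_zero (by omega)
      rw [if_neg h2, hnil, List.reverse_nil]
  | succ m ih =>
    have hn : m + 1 ≤ t.length := hm
    -- the window and its leftmost maximum
    have hWlen : (t.take (t.length - m)).length = t.length - m := by simp
    have hWne : t.take (t.length - m) ≠ [] := by
      intro hnil
      have := congrArg List.length hnil
      simp at this
      omega
    obtain ⟨c, hmax⟩ : ∃ c, PySem.List.max? (t.take (t.length - m)) (fun c => c) = some c := by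
      cases hq : PySem.List.max? (t.take (t.length - m)) (fun c => c) with
      | none => exact absurd ((PySem.List.max?_eq_none_iff _ _).mp hq) hWne
      | some c => exact ⟨c, rfl⟩
    have hcmem : c ∈ t.take (t.length - m) := PySem.List.max?_mem hmax
    obtain ⟨j, hidx⟩ : ∃ j, PySem.List.index? (t.take (t.length - m)) c = some j :=
      Option.isSome_iff_exists.mp ((PySem.List.index?_isSome_iff _ _).mpr hcmem)
    obtain ⟨hj, hWj, hfst⟩ := PySem.List.getElem_of_index?_eq_some hidx
    have hle := PySem.List.max?_isMax hmax
    have hjm : j < t.length - m := by rw [hWlen] at hj; exact hj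
    -- decompose t = (W.take j ++ [c]) ++ t.drop (j+1)
    have htj : t.take (j + 1) = (t.take (t.length - m)).take j ++ [c] := by
      have h1 : (t.take (t.length - m)).take (j + 1) = t.take (j + 1) := by
        rw [List.take_take]
        congr 1
        omega
      rw [← h1, List.take_add_one]
      congr 1
      rw [List.getElem?_eq_getElem hj, hWj]
      rfl
    -- phase 1: the stack right after processing t.take (j+1) is [c]
    have hP : pvLoop (t.take (j + 1)) [] ((t.length : Int) - (m + 1))
        = ([c], ((t.length : Int) - (m + 1)) - j) := by
      rw [htj]
      have hu : ∀ x ∈ (t.take (t.length - m)).take j, x < c := by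
        intro x hx
        obtain ⟨i, hi, hxi⟩ := List.getElem_of_mem hx
        have hij : i < j := by simp [List.length_take] at hi; omega
        have hiW : i < (t.take (t.length - m)).length := by omega
        have hxW : ((t.take (t.length - m)).take j)[i]'hi = (t.take (t.length - m))[i]'hiW :=
          List.getElem_take
        have hmem : x ∈ t.take (t.length - m) := by
          rw [← hxi, hxW]; exact List.getElem_mem hiW
        exact lt_of_le_of_ne (hle x hmem) (by rw [← hxi, hxW]; exact hfst i hij)
      have hulen : ((t.take (t.length - m)).take j).length = j := by
        simp [List.length_take]
        omega
      have := pvLoop_phase1 c ((t.take (t.length - m)).take j) [] ((t.length : Int) - (m + 1))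
        (by intro x hx; simp at hx) hu
        (by simp only [hulen, List.length_nil]; push_cast; omega)
      rw [this, hulen]
      simp only [List.length_nil, Prod.mk.injEq]
      exact ⟨trivial, by push_cast; ring⟩
    -- phase 2: c is never popped while the rest of t is processed
    have hQ2 := pvLoop_phase2 c (t.drop (j + 1)) [] (((t.length : Int) - (m + 1)) - j)
      (by omega)
      (by
        intro i hi hci
        have hdl : (t.drop (j + 1)).length = t.length - (j + 1) := by simp
        have hti : (t.drop (j + 1))[i]'hi = t[j + 1 + i]'(by simp at hi; omega) :=
          List.getElem_drop
        have hbig : t.length - m ≤ j + 1 + i := by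
          by_contra hlt
          rw [not_le] at hlt
          have hiW : j + 1 + i < (t.take (t.length - m)).length := by omega
          have : t[j + 1 + i]'(by simp at hi; omega) ∈ t.take (t.length - m) := by
            have := List.getElem_take (xs := t) (h := hiW)
            rw [← this]
            exact List.getElem_mem hiW
          have := hle _ this
          rw [← hti] at this
          exact absurd hci (not_lt.mpr this)
        simp only [List.length_nil]
        push_cast
        omega)
    -- combine
    have hsplit : pvLoop t [] ((t.length : Int) - (m + 1))
        = ((pvLoop (t.drop (j + 1)) [] (((t.length : Int) - (m + 1)) - j)).1 ++ [c],
           (pvLoop (t.drop (j + 1)) [] (((t.length : Int) - (m + 1)) - j)).2) := by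
      have h0 : pvLoop t [] ((t.length : Int) - (m + 1))
          = pvLoop (t.take (j + 1) ++ t.drop (j + 1)) [] ((t.length : Int) - (m + 1)) := by
        rw [List.take_append_drop]
      rw [h0, pvLoop_append, hP]
      simpa using hQ2
    -- bounds for the sub-run
    have hQlen := pvLoop_len (t.drop (j + 1)) [] (((t.length : Int) - (m + 1)) - j)
    have hQnn := pvLoop_budget_nonneg (t.drop (j + 1)) [] (((t.length : Int) - (m + 1)) - j)
      (by omega)
    set Q := pvLoop (t.drop (j + 1)) [] (((t.length : Int) - (m + 1)) - j) with hQdef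
    have hQ1 : (Q.1.length : Int) = m + Q.2 := by
      simp only [List.length_nil, List.length_drop] at hQlen
      push_cast [Nat.succ_le_of_lt] at hQlen
      omega
    -- reduce the truncation through the appended [c]
    have hfin : afin t ((t.length : Int) - (m + 1))
        = c :: (if 0 < Q.2 then Q.1.drop Q.2.toNat else Q.1).reverse := by
      rw [afin, hsplit]
      by_cases h2 : 0 < Q.2
      · rw [if_pos h2, if_pos h2, List.drop_append_of_le_length (by omega), List.reverse_append]
        rfl
      · rw [if_neg h2, if_neg h2, List.reverse_append]
        rfl
    -- the sub-run is greedy m on the suffix, by the induction hypothesis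
    have hsub := ih (t.drop (j + 1)) (by simp; omega)
    have hbud : ((t.drop (j + 1)).length : Int) - m = ((t.length : Int) - (m + 1)) - j := by
      simp only [List.length_drop]
      omega
    rw [hbud] at hsub
    rw [afin] at hsub
    rw [← hQdef] at hsub
    -- assemble
    have hcast1 : (t.length : Int) - ((m : Int) + 1) = (t.length : Int) - ((m + 1 : Nat) : Int) := by
      push_cast; ring
    rw [← hcast1, hfin, hsub, greedy]
    simp only [hmax, hidx]

theorem b_eq_greedy (m : Nat) (t : List Char) (lo : Nat) (acc : List Char)
    (h : lo + m ≤ t.length) :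
    altLoop t (t.length : Int) m (lo : Int) acc = acc ++ greedy m (t.drop lo) := by
  induction m generalizing lo acc with
  | zero => simp [altLoop, greedy]
  | succ m ih =>
    have hmn : m + 1 ≤ t.length := by omega
    have hbound : ((t.length : Int) - ((m : Int) + 1) + 1) = ((t.length - m : Nat) : Int) := by
      omega
    have hwin : PySem.List.slice t (some (lo : Int)) (some ((t.length : Int) - ((m : Int) + 1) + 1))
        = (t.drop lo).take ((t.drop lo).length - m) := by
      rw [hbound, PySem.List.slice_natCast]
      congr 1
      simp only [List.length_drop]
      omega
    rw [altLoop, greedy]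
    simp only [hwin]
    cases hmax : PySem.List.max? ((t.drop lo).take ((t.drop lo).length - m)) (fun c => c) with
    | none => simp
    | some c =>
      cases hidx : PySem.List.index? ((t.drop lo).take ((t.drop lo).length - m)) c with
      | none =>
        simp only [PySem.List.index?_eq_idxOf?, List.length_drop] at hidx
        simp [hidx]
      | some j =>
        obtain ⟨hj, -, -⟩ := PySem.List.getElem_of_index?_eq_some hidx
        have hjlen : j < t.length - lo - m := by
          simp only [List.length_take, List.length_drop] at hj
          omega
        simp only [List.length_drop] at hidx ⊢
        simp only [hidx]
        have hcast : (lo : Int) + (j : Int) + 1 = ((lo + j + 1 : Nat) : Int) := by push_cast; ring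
        rw [hcast, ih (lo + j + 1) (acc ++ [c]) (by omega)]
        rw [List.drop_drop]
        simp [Nat.add_assoc]

-- ===== VERDICT (by name: the statement is the Claim_ definition above) =====
theorem find_joltage_12_spec : Claim_equal_find_joltage_12 := by
  intro s num_of_digits _ hPre
  unfold Pre_find_joltage_12 at hPre
  unfold Spec_find_joltage_12 find_joltage_12 find_joltage_12_alt
  simp only []
  by_cases hgt : num_of_digits > PySem.List.len (PySem.Chars.strip s.toList)
  · rw [if_pos hgt, if_pos hgt]
  · rw [if_neg hgt, if_neg hgt]
    rw [if_neg hgt] at hPre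
    obtain ⟨h1, -⟩ := hPre
    have hlen : PySem.List.len (PySem.Chars.strip s.toList)
        = ((PySem.Chars.strip s.toList).length : Int) := PySem.List.len_eq _
    rw [not_lt, hlen] at hgt
    set t := PySem.Chars.strip s.toList with ht
    have hk : ((num_of_digits.toNat : Nat) : Int) = num_of_digits := Int.toNat_of_nonneg (by omega)
    have hkle : num_of_digits.toNat ≤ t.length := by omega
    congr 1
    -- A side equals afin
    have hA : (if 0 < (pvLoop t [] (PySem.List.len t - num_of_digits)).2
          then PySem.List.slice (pvLoop t [] (PySem.List.len t - num_of_digits)).1.reverse none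
                 (some (-(pvLoop t [] (PySem.List.len t - num_of_digits)).2))
          else (pvLoop t [] (PySem.List.len t - num_of_digits)).1.reverse)
        = afin t ((t.length : Int) - (num_of_digits.toNat : Nat)) := by
      rw [afin, hlen, hk]
      by_cases h2 : 0 < (pvLoop t [] ((t.length : Int) - num_of_digits)).2
      · rw [if_pos h2, if_pos h2]
        have hq : -(pvLoop t [] ((t.length : Int) - num_of_digits)).2
            = -(((pvLoop t [] ((t.length : Int) - num_of_digits)).2.toNat : Nat) : Int) := by
          omega
        rw [hq, PySem.List.slice_to_neg_natCast _ _ (by omega), List.length_reverse,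
          ← List.reverse_drop]
      · rw [if_neg h2, if_neg h2]
    rw [hA, a_eq_greedy num_of_digits.toNat t hkle]
    -- B side
    have hB := b_eq_greedy num_of_digits.toNat t 0 [] (by omega)
    simp only [Nat.cast_zero, List.drop_zero, List.nil_append] at hB
    rw [hlen, hB]
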